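-- pv_equiv track=rewrite | github.com/chamecall/PackTracker | Utils.py | are_rectangle_inside_another
-- ===== SOURCE A (Python) =====
-- def are_rectangle_inside_another(prob_in_rectangle, prob_out_rectangle):
--     in_xs = [point[0] for point in prob_in_rectangle]
--     in_ys = [point[1] for point in prob_in_rectangle]
--
--     out_min_x, out_max_x = min(prob_out_rectangle[0][0], prob_out_rectangle[1][0]), max(prob_out_rectangle[0][0],
--                                                                                         prob_out_rectangle[1][0])
--     out_min_y, out_max_y = min(prob_out_rectangle[0][1], prob_out_rectangle[1][1]), max(prob_out_rectangle[0][1],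
--                                                                                         prob_out_rectangle[1][1])
--
--     in_xs_are_inside_out_xs = all([out_min_x <= in_x <= out_max_x for in_x in in_xs])
--     in_ys_are_inside_out_ys = all([out_min_y <= in_y <= out_max_y for in_y in in_ys])
--     return in_xs_are_inside_out_xs and in_ys_are_inside_out_ys
-- ===== SOURCE B (Python) =====
-- def are_rectangle_inside_another(prob_in_rectangle, prob_out_rectangle):
--     (ax, ay), (bx, by) = prob_out_rectangle[0], prob_out_rectangle[1]
--     lo_x, hi_x = (ax, bx) if ax <= bx else (bx, ax)
--     lo_y, hi_y = (ay, by) if ay <= by else (by, ay)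
--     return all(lo_x <= x <= hi_x and lo_y <= y <= hi_y
--                for x, y in prob_in_rectangle)
-- ===== Notes on version B (the rewrite author's own statement) =====
-- stated objective: simpler
-- what changed: Single per-point pass with an all(...) generator over both coordinates at once, instead of building two coordinate lists and testing each axis in a separate list pass.
import Mathlib
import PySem

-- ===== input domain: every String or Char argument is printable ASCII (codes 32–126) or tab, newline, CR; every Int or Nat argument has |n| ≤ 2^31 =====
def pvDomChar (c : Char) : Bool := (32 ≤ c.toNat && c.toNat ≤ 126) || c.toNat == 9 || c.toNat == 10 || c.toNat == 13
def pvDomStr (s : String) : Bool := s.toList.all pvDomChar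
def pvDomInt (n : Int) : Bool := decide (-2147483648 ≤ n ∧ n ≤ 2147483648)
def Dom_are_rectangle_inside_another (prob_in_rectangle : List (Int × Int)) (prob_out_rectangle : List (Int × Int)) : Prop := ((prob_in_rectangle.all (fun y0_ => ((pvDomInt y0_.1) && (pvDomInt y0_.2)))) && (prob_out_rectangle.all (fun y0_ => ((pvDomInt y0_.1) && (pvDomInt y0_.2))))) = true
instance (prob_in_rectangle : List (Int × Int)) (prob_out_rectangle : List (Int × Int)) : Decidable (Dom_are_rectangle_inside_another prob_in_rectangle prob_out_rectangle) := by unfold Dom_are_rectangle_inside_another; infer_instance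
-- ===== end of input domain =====

-- ===== PORT A =====
-- B collapses A's two per-axis list passes into one per-point pass; objective: simpler.
-- Pre_ excludes inputs where prob_out_rectangle has fewer than 2 points (Python A raises IndexError there).
def are_rectangle_inside_another (prob_in_rectangle : List (Int × Int)) (prob_out_rectangle : List (Int × Int)) : Bool :=
  match prob_out_rectangle with
  | p0 :: p1 :: _ =>
    let in_xs := prob_in_rectangle.map (fun point => point.1)
    let in_ys := prob_in_rectangle.map (fun point => point.2)
    let out_min_x := min p0.1 p1.1
    let out_max_x := max p0.1 p1.1
    let out_min_y := min p0.2 p1.2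
    let out_max_y := max p0.2 p1.2
    let in_xs_are_inside_out_xs := in_xs.all (fun in_x => decide (out_min_x ≤ in_x) && decide (in_x ≤ out_max_x))
    let in_ys_are_inside_out_ys := in_ys.all (fun in_y => decide (out_min_y ≤ in_y) && decide (in_y ≤ out_max_y))
    in_xs_are_inside_out_xs && in_ys_are_inside_out_ys
  | _ => false  -- IndexError in Python; excluded by Pre_

-- ===== PORT B =====
def are_rectangle_inside_another_alt (prob_in_rectangle : List (Int × Int)) (prob_out_rectangle : List (Int × Int)) : Bool :=
  if h : 1 < prob_out_rectangle.length then
    let q0 := prob_out_rectangle[0]'(by omega)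
    let q1 := prob_out_rectangle[1]'h
    let lohix := if q0.1 ≤ q1.1 then (q0.1, q1.1) else (q1.1, q0.1)
    let lohiy := if q0.2 ≤ q1.2 then (q0.2, q1.2) else (q1.2, q0.2)
    prob_in_rectangle.all (fun pt =>
      decide (lohix.1 ≤ pt.1) && decide (pt.1 ≤ lohix.2) &&
      (decide (lohiy.1 ≤ pt.2) && decide (pt.2 ≤ lohiy.2)))
  else false  -- IndexError in Python; excluded by Pre_

-- ===== PRECONDITION & SPEC =====
-- Pre_ excludes exactly the inputs where A raises IndexError (fewer than 2 outer points).
def Pre_are_rectangle_inside_another (prob_in_rectangle : List (Int × Int)) (prob_out_rectangle : List (Int × Int)) : Prop :=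
  2 ≤ prob_out_rectangle.length
instance (prob_in_rectangle : List (Int × Int)) (prob_out_rectangle : List (Int × Int)) : Decidable (Pre_are_rectangle_inside_another prob_in_rectangle prob_out_rectangle) := by unfold Pre_are_rectangle_inside_another; infer_instance
def pvWitness_are_rectangle_inside_another : (List (Int × Int)) × (List (Int × Int)) := ([(1, 1)], [(0, 0), (2, 2)])
def Spec_are_rectangle_inside_another (prob_in_rectangle : List (Int × Int)) (prob_out_rectangle : List (Int × Int)) (out : Bool) : Prop := out = are_rectangle_inside_another_alt prob_in_rectangle prob_out_rectangle
instance (prob_in_rectangle : List (Int × Int)) (prob_out_rectangle : List (Int × Int)) (out : Bool) : Decidable (Spec_are_rectangle_inside_another prob_in_rectangle prob_out_rectangle out) := by unfold Spec_are_rectangle_inside_another; infer_instance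

-- ===== CLAIM =====
def Claim_equal_are_rectangle_inside_another : Prop := ∀ (prob_in_rectangle : List (Int × Int)) (prob_out_rectangle : List (Int × Int)), Dom_are_rectangle_inside_another prob_in_rectangle prob_out_rectangle → Pre_are_rectangle_inside_another prob_in_rectangle prob_out_rectangle → Spec_are_rectangle_inside_another prob_in_rectangle prob_out_rectangle (are_rectangle_inside_another prob_in_rectangle prob_out_rectangle)

-- ===== LEMMAS AND PROOFS =====
theorem rect_eq (pin pout : List (Int × Int)) (h : 2 ≤ pout.length) :
    are_rectangle_inside_another pin pout = are_rectangle_inside_another_alt pin pout := by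
  match pout with
  | [] => simp at h
  | [_] => simp at h
  | (ax, ay) :: (bx, by2) :: rest =>
    simp only [are_rectangle_inside_another, are_rectangle_inside_another_alt]
    rw [dif_pos (by simp)]
    rw [Bool.eq_iff_iff]
    simp only [List.all_map, List.all_eq_true, Function.comp, Bool.and_eq_true,
      decide_eq_true_eq, List.getElem_cons_zero, List.getElem_cons_succ]
    constructor
    · rintro ⟨hx, hy⟩ p hp
      have h1 := hx p hp; have h2 := hy p hp
      split_ifs <;> simp_all <;> omega
    · intro hpt
      refine ⟨fun p hp => ?_, fun p hp => ?_⟩ <;>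
        · have := hpt p hp
          split_ifs at this <;> simp_all <;> omega

-- ===== VERDICT =====
theorem are_rectangle_inside_another_spec : Claim_equal_are_rectangle_inside_another := by
  intro pin pout _ hpre
  exact rect_eq pin pout hpre
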